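-- pv_equiv track=rewrite | github.com/DiegoVa6/42-python-modules | module_03/ex5/ft_data_stream.py | event_creation
-- ===== SOURCE A (Python) =====
-- def event_creation(n):
--     """
--     Function to create 'random' events
--     """
--     for i in range(1, n+1):
--         if i % 3 == 1:
--             player = "alice"
--             level = 5
--             action = "killed monster"
--         elif i % 3 == 2:
--             player = "bob"
--             level = 12
--             action = "found treasure"
--         else:
--             player = "charlie"
--             level = 8
--             action = "leveled up"
--         yield (i, player, level, action)
-- ===== SOURCE B (Python) =====
-- def event_creation(n):
--     """
--     Function to create 'random' events
--     """
--     templates = [("alice", 5, "killed monster"),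
--                  ("bob", 12, "found treasure"),
--                  ("charlie", 8, "leveled up")]
--     q, r = divmod(max(n, 0), 3)
--     stream = templates * q + templates[:r]
--     for i, (player, level, action) in enumerate(stream, start=1):
--         yield (i, player, level, action)
-- ===== Notes on version B (the rewrite author's own statement) =====
-- stated objective: alternative
-- what changed: Instead of selecting an event per iteration with an if/elif on the index modulus, B materialises the whole payload stream at once by repeating the template list for the full cycles (via divmod) plus a slice for the remainder, then enumerates it; no per-item branch or modulus remains in the loop.
import Mathlib
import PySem

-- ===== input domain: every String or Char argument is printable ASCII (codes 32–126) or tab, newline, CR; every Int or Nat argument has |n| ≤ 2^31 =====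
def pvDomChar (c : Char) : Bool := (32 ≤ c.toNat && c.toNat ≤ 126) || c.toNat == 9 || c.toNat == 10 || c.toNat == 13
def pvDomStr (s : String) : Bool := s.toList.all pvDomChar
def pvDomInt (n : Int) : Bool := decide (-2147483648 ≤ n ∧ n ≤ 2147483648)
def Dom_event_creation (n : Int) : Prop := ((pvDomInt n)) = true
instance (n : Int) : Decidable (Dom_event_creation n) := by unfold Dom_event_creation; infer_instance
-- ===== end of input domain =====

-- B builds the whole payload stream at once by list repetition and slicing (templates * q + templates[:r]) and enumerates it, removing the per-item if/elif modulus dispatch (alternative; same cost).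

-- ===== PORT A =====
def event_creation (n : Int) : List (Int × String × Int × String) :=
  (PySem.List.pyRange 1 (n + 1) 1).map (fun i =>
    if PySem.Int.mod i 3 = 1 then (i, "alice", 5, "killed monster")
    else if PySem.Int.mod i 3 = 2 then (i, "bob", 12, "found treasure")
    else (i, "charlie", 8, "leveled up"))

-- ===== PORT B =====
def pvTemplates : List (String × Int × String) :=
  [("alice", 5, "killed monster"), ("bob", 12, "found treasure"), ("charlie", 8, "leveled up")]

def event_creation_alt (n : Int) : List (Int × String × Int × String) :=
  let q := PySem.Int.floordiv (max n 0) 3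
  let r := PySem.Int.mod (max n 0) 3
  let stream := PySem.List.pyRepeat pvTemplates q ++ PySem.List.slice pvTemplates none (some r)
  (PySem.List.enumerate stream 1).map (fun p => (p.1, p.2.1, p.2.2.1, p.2.2.2))

-- ===== PRECONDITION & SPEC =====
def Spec_event_creation (n : Int) (out : List (Int × String × Int × String)) : Prop := out = event_creation_alt n
instance (n : Int) (out : List (Int × String × Int × String)) : Decidable (Spec_event_creation n out) := by unfold Spec_event_creation; infer_instance

-- ===== CLAIM (what is proved, stated in full; the proofs are below) =====
def Claim_equal_event_creation : Prop := ∀ (n : Int), Dom_event_creation n → Spec_event_creation n (event_creation n)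

-- ===== LEMMAS AND PROOFS =====

-- the template picked for the (j+1)-th event (j counted from 0)
def pvSel (j : Nat) : String × Int × String := pvTemplates.getD (j % 3) ("", 0, "")

theorem pv_flatten_replicate (q : Nat) :
    (List.replicate q pvTemplates).flatten = (List.range (3 * q)).map pvSel := by
  induction q with
  | zero => simp
  | succ q ih =>
    rw [List.replicate_succ', List.flatten_append, ih,
        show 3 * (q + 1) = 3 * q + 3 by ring, List.range_add, List.map_append]
    congr 1
    simp [List.range_succ, pvSel, pvTemplates]

theorem pv_stream_eq (k : Nat) :
    (List.replicate (k / 3) pvTemplates).flatten ++ pvTemplates.take (k % 3)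
      = (List.range k).map pvSel := by
  conv_rhs => rw [show k = 3 * (k / 3) + k % 3 from (Nat.div_add_mod k 3).symm]
  rw [List.range_add, List.map_append, pv_flatten_replicate]
  congr 1
  have h : k % 3 < 3 := Nat.mod_lt _ (by omega)
  have h0 : pvSel (3 * (k / 3)) = ("alice", 5, "killed monster") := by
    have : (3 * (k / 3)) % 3 = 0 := by omega
    simp [pvSel, this, pvTemplates]
  have h1 : pvSel (3 * (k / 3) + 1) = ("bob", 12, "found treasure") := by
    have : (3 * (k / 3) + 1) % 3 = 1 := by omega
    simp [pvSel, this, pvTemplates]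
  interval_cases h' : k % 3 <;>
    simp [List.range_succ, h0, h1, pvTemplates]

theorem pv_pointwise (j : Nat) :
    (if PySem.Int.mod (1 + (j : Int)) 3 = 1 then ((1 + (j : Int)), "alice", (5 : Int), "killed monster")
     else if PySem.Int.mod (1 + (j : Int)) 3 = 2 then ((1 + (j : Int)), "bob", 12, "found treasure")
     else ((1 + (j : Int)), "charlie", 8, "leveled up"))
    = ((1 + (j : Int)), (pvSel j).1, (pvSel j).2.1, (pvSel j).2.2) := by
  rw [PySem.Int.mod_eq_emod_of_pos (by omega)]
  have h : j % 3 = 0 ∨ j % 3 = 1 ∨ j % 3 = 2 := by omega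
  rcases h with h | h | h <;>
  · have h1 : (1 + (j : Int)) % 3 = ((1 + j % 3 : Nat) % 3 : Nat) := by omega
    simp [h1, h, pvSel, pvTemplates]

-- ===== VERDICT (by name: the statement is the Claim_ definition above) =====
theorem event_creation_spec : Claim_equal_event_creation := by
  intro n _
  unfold Spec_event_creation event_creation event_creation_alt
  set k : Nat := n.toNat with hk
  have hm : max n 0 = (k : Int) := by omega
  have hq : PySem.Int.floordiv (max n 0) 3 = ((k / 3 : Nat) : Int) := by
    rw [PySem.Int.floordiv_eq_ediv_of_pos (by omega), hm]; omega
  have hr : PySem.Int.mod (max n 0) 3 = ((k % 3 : Nat) : Int) := by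
    rw [PySem.Int.mod_eq_emod_of_pos (by omega), hm]; omega
  have hrepeat : PySem.List.pyRepeat pvTemplates ((k / 3 : Nat) : Int)
      = (List.replicate (k / 3) pvTemplates).flatten := by
    rw [show PySem.List.pyRepeat pvTemplates ((k / 3 : Nat) : Int)
          = (List.replicate (((k / 3 : Nat) : Int)).toNat pvTemplates).flatten from rfl,
        Int.toNat_natCast]
  have halt : (PySem.List.enumerate (PySem.List.pyRepeat pvTemplates (PySem.Int.floordiv (max n 0) 3) ++ PySem.List.slice pvTemplates none (some (PySem.Int.mod (max n 0) 3))) 1).map (fun p => (p.1, p.2.1, p.2.2.1, p.2.2.2))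
      = (PySem.List.enumerate ((List.range k).map pvSel) 1).map (fun p => (p.1, p.2.1, p.2.2.1, p.2.2.2)) := by
    rw [hq, hr, PySem.List.slice_to _ (by omega), hrepeat, Int.toNat_natCast, pv_stream_eq k]
  rw [show (let q := PySem.Int.floordiv (max n 0) 3
            let r := PySem.Int.mod (max n 0) 3
            let stream := PySem.List.pyRepeat pvTemplates q ++ PySem.List.slice pvTemplates none (some r)
            (PySem.List.enumerate stream 1).map (fun p => (p.1, p.2.1, p.2.2.1, p.2.2.2)))
      = (PySem.List.enumerate ((List.range k).map pvSel) 1).map (fun p => (p.1, p.2.1, p.2.2.1, p.2.2.2)) from halt]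
  rw [PySem.List.pyRange_one]
  have hlen : (n + 1 - 1).toNat = k := by omega
  rw [hlen, List.map_map]
  apply List.ext_getElem?
  intro j
  simp only [List.getElem?_map, PySem.List.getElem?_enumerate, Option.map_map]
  by_cases hj : j < k
  · rw [List.getElem?_eq_getElem (by simpa using hj)]
    simp only [Option.map_some, List.getElem_range, Function.comp_apply]
    exact congrArg some (pv_pointwise j)
  · rw [List.getElem?_eq_none (by simpa using Nat.le_of_not_lt hj)]
    simp
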